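-- pv_equiv track=rewrite | github.com/jess-sickles/206Proj1 | Project1withCode.py | classSizes
-- ===== SOURCE A (Python) =====
-- def classSizes(data):
-- # Input: list of dictionaries
-- # Output: Return a list of tuples ordered by
-- # ClassName and Class size, e.g
-- # [('Senior', 26), ('Junior', 25), ('Freshman', 21), ('Sophomore', 18)]
-- 	frosh = 0
-- 	soph = 0
-- 	jun = 0
-- 	senior = 0
-- 	for dic in data:
-- 		if dic.get('Class') == "Freshman":
-- 			frosh += 1
-- 		if dic.get('Class') == "Sophomore":
-- 			soph +=1
-- 		if dic.get('Class') == "Junior":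
-- 			jun +=1
-- 		elif dic.get('Class') == "Senior":
-- 			senior +=1
-- 	tuplist = [("Freshman",frosh), ("Sophomore",soph), ("Junior", jun), ("Senior", senior)]
-- 	newlist = sorted(tuplist, key = lambda x: x[1] ,reverse = True )
-- 	return newlist
--
-- 	#Your code here:
-- 	pass
-- ===== SOURCE B (Python) =====
-- def classSizes(data):
--     frosh = sum(1 for d in data if d.get('Class') == "Freshman")
--     soph = sum(1 for d in data if d.get('Class') == "Sophomore")
--     jun = sum(1 for d in data if d.get('Class') == "Junior")
--     senior = sum(1 for d in data if d.get('Class') == "Senior")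
--     tuplist = [("Freshman", frosh), ("Sophomore", soph), ("Junior", jun), ("Senior", senior)]
--     return sorted(tuplist, key=lambda x: x[1], reverse=True)
-- ===== Notes on version B (the rewrite author's own statement) =====
-- stated objective: alternative
-- what changed: Replaces the single loop threading four mutable counters (with an if/elif pair for Junior/Senior) by four independent one-condition scans, one per class name, feeding the same fixed-order list into the stable sort.
import Mathlib
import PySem

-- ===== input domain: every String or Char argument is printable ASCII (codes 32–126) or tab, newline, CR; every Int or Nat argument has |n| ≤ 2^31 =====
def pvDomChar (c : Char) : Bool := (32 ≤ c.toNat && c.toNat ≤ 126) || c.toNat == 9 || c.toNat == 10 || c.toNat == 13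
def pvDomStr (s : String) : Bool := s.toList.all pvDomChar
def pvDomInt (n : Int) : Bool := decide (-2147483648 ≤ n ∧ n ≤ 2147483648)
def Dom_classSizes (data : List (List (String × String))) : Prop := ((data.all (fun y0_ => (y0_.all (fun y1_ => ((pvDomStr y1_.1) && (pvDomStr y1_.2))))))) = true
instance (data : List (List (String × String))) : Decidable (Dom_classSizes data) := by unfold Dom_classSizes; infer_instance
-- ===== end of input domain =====

-- B replaces A's single loop with four accumulators by four independent one-condition scans; objective: alternative decomposition (same cost).

-- ===== PORT A =====
-- one pass, four counters; Junior/Senior share an if/elif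
def classSizesStep (st : Int × Int × Int × Int) (dic : List (String × String)) :
    Int × Int × Int × Int :=
  let g := (PySem.Dict.mk dic).get? "Class"
  let frosh := if g = some "Freshman" then st.1 + 1 else st.1
  let soph := if g = some "Sophomore" then st.2.1 + 1 else st.2.1
  let jun := if g = some "Junior" then st.2.2.1 + 1 else st.2.2.1
  let senior := if g = some "Junior" then st.2.2.2
    else if g = some "Senior" then st.2.2.2 + 1 else st.2.2.2
  (frosh, soph, jun, senior)

def classSizes (data : List (List (String × String))) : List (String × Int) :=
  let st := data.foldl classSizesStep (0, 0, 0, 0)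
  let tuplist : List (String × Int) :=
    [("Freshman", st.1), ("Sophomore", st.2.1), ("Junior", st.2.2.1), ("Senior", st.2.2.2)]
  PySem.List.sorted tuplist (fun x => x.2) true

-- ===== PORT B =====
-- sum(1 for d in data if d.get('Class') == c), one scan per class name
def countClass (data : List (List (String × String))) (c : String) : Int :=
  data.foldl (fun acc dic => if (PySem.Dict.mk dic).get? "Class" = some c then acc + 1 else acc) 0

def classSizes_alt (data : List (List (String × String))) : List (String × Int) :=
  let tuplist : List (String × Int) :=
    [("Freshman", countClass data "Freshman"), ("Sophomore", countClass data "Sophomore"),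
     ("Junior", countClass data "Junior"), ("Senior", countClass data "Senior")]
  PySem.List.sorted tuplist (fun x => x.2) true

-- ===== PRECONDITION & SPEC =====
def Spec_classSizes (data : List (List (String × String))) (out : List (String × Int)) : Prop := out = classSizes_alt data
instance (data : List (List (String × String))) (out : List (String × Int)) : Decidable (Spec_classSizes data out) := by unfold Spec_classSizes; infer_instance

-- ===== CLAIM (what is proved, stated in full; the proofs are below) =====
def Claim_equal_classSizes : Prop := ∀ (data : List (List (String × String))), Dom_classSizes data → Spec_classSizes data (classSizes data)

-- ===== LEMMAS AND PROOFS =====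


lemma countClass_shift (data : List (List (String × String))) (c : String) (a : Int) :
    data.foldl (fun acc dic => if (PySem.Dict.mk dic).get? "Class" = some c then acc + 1 else acc) a
      = a + countClass data c := by
  induction data generalizing a with
  | nil => simp [countClass]
  | cons d t ih =>
    have h0 : countClass (d :: t) c
        = (if (PySem.Dict.mk d).get? "Class" = some c then (0:Int) + 1 else 0) + countClass t c :=
      ih _
    rw [List.foldl_cons, ih, h0]
    split_ifs <;> ring

lemma countClass_cons (d : List (String × String)) (t : List (List (String × String))) (c : String) :
    countClass (d :: t) c
      = (if (PySem.Dict.mk d).get? "Class" = some c then (1:Int) else 0) + countClass t c := by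
  have h0 : countClass (d :: t) c
      = (if (PySem.Dict.mk d).get? "Class" = some c then (0:Int) + 1 else 0) + countClass t c :=
    countClass_shift t c _
  rw [h0]; split_ifs <;> ring

lemma classSizes_foldl (data : List (List (String × String))) (f s j sr : Int) :
    data.foldl classSizesStep (f, s, j, sr)
      = (f + countClass data "Freshman", s + countClass data "Sophomore",
         j + countClass data "Junior", sr + countClass data "Senior") := by
  induction data generalizing f s j sr with
  | nil => simp [countClass]
  | cons d t ih =>
    rw [List.foldl_cons, countClass_cons, countClass_cons, countClass_cons, countClass_cons]
    show List.foldl classSizesStep (classSizesStep (f, s, j, sr) d) t = _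
    simp only [classSizesStep]
    rw [ih]
    have hJS : ("Junior" : String) ≠ "Senior" := by decide
    simp only [Prod.mk.injEq]
    refine ⟨?_, ?_, ?_, ?_⟩ <;> split_ifs <;> simp_all <;> ring

-- ===== VERDICT (by name: the statement is the Claim_ definition above) =====
theorem classSizes_spec : Claim_equal_classSizes := by
  intro data _
  show classSizes data = classSizes_alt data
  simp [classSizes, classSizes_alt, classSizes_foldl]
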